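-- pv_equiv track=rewrite | github.com/leo606/restaurant-orders-trybe | src/analyze_log.py | days_never_went
-- ===== SOURCE A (Python) =====
-- def days_never_went(data, person):
--     all_days = set()
--     person_went_days = set()
--
--     for order in data:
--         all_days.add(order['day'])
--         if order['name'] == person:
--             person_went_days.add(order['day'])
--
--     return all_days.difference(person_went_days)
-- ===== SOURCE B (Python) =====
-- def days_never_went(data, person):
--     day_visitors = {}
--     for order in data:
--         day_visitors.setdefault(order['day'], set()).add(order['name'])
--     return {day for day in day_visitors if person not in day_visitors[day]}
-- ===== Notes on version B (the rewrite author's own statement) =====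
-- stated objective: alternative
-- what changed: B builds a day->visitors index in one pass and then filters the index's days by membership of person, instead of A's single loop maintaining two parallel day-sets and a final set difference.
import Mathlib
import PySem

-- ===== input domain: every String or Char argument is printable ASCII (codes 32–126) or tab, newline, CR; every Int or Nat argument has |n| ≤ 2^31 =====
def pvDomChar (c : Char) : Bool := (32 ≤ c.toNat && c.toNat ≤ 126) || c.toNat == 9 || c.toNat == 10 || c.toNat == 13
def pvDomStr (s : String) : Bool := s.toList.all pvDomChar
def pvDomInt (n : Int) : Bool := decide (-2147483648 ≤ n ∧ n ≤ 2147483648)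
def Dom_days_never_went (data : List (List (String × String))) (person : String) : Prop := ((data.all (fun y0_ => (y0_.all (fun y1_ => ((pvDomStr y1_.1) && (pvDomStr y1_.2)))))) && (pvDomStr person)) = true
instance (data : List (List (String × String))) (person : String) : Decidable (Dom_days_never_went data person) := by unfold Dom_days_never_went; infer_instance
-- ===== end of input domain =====

-- B builds a day→visitors index and filters it by membership, instead of A's two parallel
-- day-sets plus a set difference; alternative decomposition, same asymptotic cost.

-- ===== PORT A =====
-- order['day'] / order['name'] on the association-list dict (total via getD; Pre_ guarantees the keys exist)
def pvDay (order : List (String × String)) : String := ((PySem.Dict.mk order).get? "day").getD ""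
def pvName (order : List (String × String)) : String := ((PySem.Dict.mk order).get? "name").getD ""

-- the body of A's single loop: add the day to all_days, and to person_went_days if the name matches
def pvStepA (person : String) (st : PySem.Set String × PySem.Set String)
    (order : List (String × String)) : PySem.Set String × PySem.Set String :=
  let all := PySem.Set.add st.1 (pvDay order)
  if pvName order == person then (all, PySem.Set.add st.2 (pvDay order)) else (all, st.2)

def days_never_went (data : List (List (String × String))) (person : String) : List String :=
  let st := data.foldl (pvStepA person) (PySem.Set.empty, PySem.Set.empty)
  PySem.Set.diff st.1 st.2

-- ===== PORT B =====
-- the body of B's indexing loop: day_visitors.setdefault(order['day'], set()).add(order['name'])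
def pvStepB (d : PySem.Dict String (PySem.Set String)) (order : List (String × String)) :
    PySem.Dict String (PySem.Set String) :=
  d.modify (pvDay order) PySem.Set.empty (fun s => PySem.Set.add s (pvName order))

def days_never_went_alt (data : List (List (String × String))) (person : String) : List String :=
  let dv := data.foldl pvStepB PySem.Dict.empty
  PySem.Set.ofList (dv.keys.filter
    (fun day => !(PySem.Set.contains (dv.getD day PySem.Set.empty) person)))

-- ===== PRECONDITION & SPEC =====
-- Pre_ excludes exactly the inputs where some order lacks a 'day' or 'name' key: there the Python raises KeyError.
def Pre_days_never_went (data : List (List (String × String))) (person : String) : Prop :=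
  data.all (fun order => (PySem.Dict.mk order).contains "day" && (PySem.Dict.mk order).contains "name") = true
instance (data : List (List (String × String))) (person : String) : Decidable (Pre_days_never_went data person) := by unfold Pre_days_never_went; infer_instance
def pvWitness_days_never_went : (List (List (String × String))) × String :=
  ([[("day", "monday"), ("name", "maria")], [("day", "tuesday"), ("name", "joao")]], "joao")

def Spec_days_never_went (data : List (List (String × String))) (person : String) (out : List String) : Prop := out = days_never_went_alt data person
instance (data : List (List (String × String))) (person : String) (out : List String) : Decidable (Spec_days_never_went data person out) := by unfold Spec_days_never_went; infer_instance

-- ===== CLAIM (what is proved, stated in full; the proofs are below) =====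
def Claim_equal_days_never_went : Prop := ∀ (data : List (List (String × String))) (person : String), Dom_days_never_went data person → Pre_days_never_went data person → Spec_days_never_went data person (days_never_went data person)

-- ===== LEMMAS AND PROOFS =====

-- (d.insert k v).keys as a set-add on the key list
lemma pv_keys_insert (d : PySem.Dict String (PySem.Set String)) (k : String) (v : PySem.Set String) :
    (d.insert k v).keys = PySem.Set.add d.keys k := by
  by_cases h : d.contains k = true
  · rw [PySem.Dict.keys_insert_of_contains d v h,
      PySem.Set.add_of_mem ((PySem.Dict.contains_iff_mem_keys _ _).1 h)]
  · have h' : d.contains k = false := by simpa using h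
    rw [PySem.Dict.keys_insert_of_not_contains d v h', PySem.Set.add_of_not_mem]
    intro hm
    exact h ((PySem.Dict.contains_iff_mem_keys _ _).2 hm)

-- Invariant-carrying induction: relate A's pair of sets to B's dict after folding over data.
lemma pv_main (person : String) (data : List (List (String × String)))
    (all went : PySem.Set String) (d : PySem.Dict String (PySem.Set String))
    (hnd : all.Nodup) (hkeys : d.keys = all)
    (hmem : ∀ k, person ∈ d.getD k PySem.Set.empty ↔ k ∈ went) :
    PySem.Set.diff (data.foldl (pvStepA person) (all, went)).1
        (data.foldl (pvStepA person) (all, went)).2 =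
      PySem.Set.ofList ((data.foldl pvStepB d).keys.filter
        (fun day => !(PySem.Set.contains ((data.foldl pvStepB d).getD day PySem.Set.empty) person))) := by
  induction data generalizing all went d with
  | nil =>
    simp only [List.foldl]
    subst hkeys
    have hcongr : ∀ k ∈ d.keys,
        (!(PySem.Set.contains (d.getD k PySem.Set.empty) person)) = !(PySem.Set.contains went k) := by
      intro k _
      have h1 := hmem k
      by_cases h : k ∈ went
      · rw [(PySem.Set.contains_iff _ _).2 (h1.2 h), (PySem.Set.contains_iff _ _).2 h]
      · have : person ∉ d.getD k PySem.Set.empty := fun hc => h (h1.1 hc)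
        have e1 : PySem.Set.contains (d.getD k PySem.Set.empty) person = false := by
          cases hb : PySem.Set.contains (d.getD k PySem.Set.empty) person
          · rfl
          · exact absurd ((PySem.Set.contains_iff _ _).1 hb) this
        have e2 : PySem.Set.contains went k = false := by
          cases hb : PySem.Set.contains went k
          · rfl
          · exact absurd ((PySem.Set.contains_iff _ _).1 hb) h
        rw [e1, e2]
    rw [List.filter_congr hcongr]
    have hnd2 : (List.filter (fun x => !(PySem.Set.contains went x)) d.keys).Nodup :=
      List.Nodup.filter _ hnd
    rw [PySem.Set.ofList_eq_self_of_nodup _ hnd2]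
    rfl
  | cons order rest ih =>
    simp only [List.foldl]
    have hB : ∀ k, (pvStepB d order).getD k PySem.Set.empty
        = if k = pvDay order then PySem.Set.add (d.getD (pvDay order) PySem.Set.empty) (pvName order)
          else d.getD k PySem.Set.empty := by
      intro k
      show (d.insert (pvDay order) _).getD k PySem.Set.empty = _
      rw [PySem.Dict.getD_insert]
    have hBkeys : (pvStepB d order).keys = PySem.Set.add all (pvDay order) := by
      show (d.insert (pvDay order) _).keys = _
      rw [pv_keys_insert, hkeys]
    by_cases hp : (pvName order == person) = true
    · have hA : pvStepA person (all, went) order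
          = (PySem.Set.add all (pvDay order), PySem.Set.add went (pvDay order)) := by
        simp [pvStepA, hp]
      rw [hA]
      apply ih
      · exact PySem.Set.nodup_add _ _ hnd
      · exact hBkeys
      · intro k
        rw [hB k]
        by_cases hk : k = pvDay order
        · rw [if_pos hk, hk, PySem.Set.mem_add, PySem.Set.mem_add]
          have hpe : person = pvName order := (eq_of_beq hp).symm
          exact ⟨fun _ => Or.inr rfl, fun _ => Or.inr hpe⟩
        · simp only [if_neg hk]
          rw [hmem k, PySem.Set.mem_add]
          exact ⟨Or.inl, fun h => h.resolve_right fun e => hk e⟩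
    · have hA : pvStepA person (all, went) order
          = (PySem.Set.add all (pvDay order), went) := by
        simp [pvStepA, hp]
      rw [hA]
      apply ih
      · exact PySem.Set.nodup_add _ _ hnd
      · exact hBkeys
      · intro k
        rw [hB k]
        by_cases hk : k = pvDay order
        · rw [if_pos hk, hk, PySem.Set.mem_add]
          have hpe : ¬ person = pvName order := fun h => hp (beq_iff_eq.2 h.symm)
          exact ⟨fun h => (hmem _).1 (h.resolve_right hpe), fun h => Or.inl ((hmem _).2 h)⟩
        · simp only [if_neg hk]
          exact hmem k

-- ===== VERDICT (by name: the statement is the Claim_ definition above) =====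
theorem days_never_went_spec : Claim_equal_days_never_went := by
  intro data person _ _
  show days_never_went data person = days_never_went_alt data person
  unfold days_never_went days_never_went_alt
  exact pv_main person data PySem.Set.empty PySem.Set.empty PySem.Dict.empty
    List.nodup_nil rfl (by intro k; simp [PySem.Dict.getD_empty, PySem.Set.empty])
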